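-- pv_equiv track=rewrite | github.com/CodeTechBen/Leetcode | lighbulb/main.py | light_bulbs
-- ===== SOURCE A (Python) =====
-- def light_bulbs(lights, n):
--     for _ in range(n):
--         new_lights = lights[:]
--
--         for i in range(len(lights)):
--             if lights[i] == 1:
--                 if i + 1 < len(lights):
--                     new_lights[i + 1] = 1 - new_lights[i + 1]
--                 else:
--                     new_lights[0] = 1 - new_lights[0]
--         lights = new_lights
--
--     return lights
-- ===== SOURCE B (Python) =====
-- def light_bulbs(lights, n):
--     # Each bulb only ever holds its original value or 1 minus it, so the whole
--     # configuration lives in a finite state space and the evolution is eventually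
--     # periodic: simulate one synchronous round at a time (a gather from the cyclic
--     # left neighbour), remember each configuration with the time it first occurred,
--     # and once a repeat appears jump ahead by the period instead of replaying it.
--     def step(state):
--         return [1 - state[j] if state[j - 1] == 1 else state[j]
--                 for j in range(len(state))]
--
--     state = list(lights)
--     m = max(n, 0)
--     seen = {}
--     t = 0
--     while t < m:
--         key = tuple(state)
--         if key in seen:
--             period = t - seen[key]
--             for _ in range((m - t) % period):
--                 state = step(state)
--             return state
--         seen[key] = t
--         state = step(state)
--         t += 1
--     return state
-- ===== Notes on version B (the rewrite author's own statement) =====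
-- stated objective: faster
-- what changed: Instead of A's n rounds of copy-then-scatter toggling, B gathers each round from the cyclic left neighbour and adds cycle detection: every configuration is memoised with its first occurrence time in a dictionary, and at the first repeat the remaining rounds are reduced modulo the period and only that remainder is replayed, so huge n with a short orbit costs only the orbit length.
import Mathlib
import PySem

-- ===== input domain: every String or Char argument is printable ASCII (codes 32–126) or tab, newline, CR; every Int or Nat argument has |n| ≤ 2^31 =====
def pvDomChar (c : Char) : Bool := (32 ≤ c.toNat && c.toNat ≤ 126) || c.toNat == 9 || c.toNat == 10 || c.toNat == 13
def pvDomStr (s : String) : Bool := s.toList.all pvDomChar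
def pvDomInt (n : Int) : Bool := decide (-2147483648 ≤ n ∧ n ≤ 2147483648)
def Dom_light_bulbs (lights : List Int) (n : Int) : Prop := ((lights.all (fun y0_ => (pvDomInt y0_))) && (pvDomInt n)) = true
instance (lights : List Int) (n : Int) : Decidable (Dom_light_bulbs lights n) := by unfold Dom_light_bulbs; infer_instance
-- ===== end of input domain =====

-- B replaces A's n rounds of copy-then-scatter toggling by a gather step plus cycle
-- detection: configurations are memoised with their first occurrence time and, at the
-- first repeat, the remaining rounds are reduced modulo the period; objective: faster
-- when the orbit is shorter than n (measured on generated inputs).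


-- ===== PORT A =====
def light_bulbs (lights : List Int) (n : Int) : List Int :=
  (PySem.List.pyRange 0 n 1).foldl (fun lights _ =>
    let new_lights := PySem.List.slice lights none none
    (PySem.List.pyRange 0 (PySem.List.len lights) 1).foldl (fun new_lights i =>
      if PySem.List.pyGetD lights i 0 = 1 then
        if i + 1 < PySem.List.len lights then
          PySem.List.pySetD new_lights (i + 1) (1 - PySem.List.pyGetD new_lights (i + 1) 0)
        else
          PySem.List.pySetD new_lights 0 (1 - PySem.List.pyGetD new_lights 0 0)
      else new_lights) new_lights) lights

-- ===== PORT B =====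
-- 'def step(state): return [1 - state[j] if state[j - 1] == 1 else state[j] for j in range(len(state))]'
def light_bulbs_altStep (state : List Int) : List Int :=
  (PySem.List.pyRange 0 (PySem.List.len state) 1).map (fun j =>
    if PySem.List.pyGetD state (j - 1) 0 = 1 then 1 - PySem.List.pyGetD state j 0
    else PySem.List.pyGetD state j 0)

-- 'for _ in range((m - t) % period): state = step(state)'
def light_bulbs_altRun : Nat → List Int → List Int
  | 0, state => state
  | k + 1, state => light_bulbs_altRun k (light_bulbs_altStep state)

-- 'while t < m: …' with fuel = m - t
def light_bulbs_altLoop : Nat → Nat → Nat → PySem.Dict (List Int) Nat → List Int → List Int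
  | 0, _, _, _, state => state
  | fuel + 1, m, t, seen, state =>
    match PySem.Dict.get? seen state with
    | some t0 => light_bulbs_altRun ((m - t) % (t - t0)) state
    | none =>
      light_bulbs_altLoop fuel m (t + 1) (PySem.Dict.insert seen state t)
        (light_bulbs_altStep state)

def light_bulbs_alt (lights : List Int) (n : Int) : List Int :=
  let state := lights
  let m := (max n 0).toNat
  light_bulbs_altLoop m m 0 PySem.Dict.empty state

-- ===== PRECONDITION & SPEC =====
def Spec_light_bulbs (lights : List Int) (n : Int) (out : List Int) : Prop := out = light_bulbs_alt lights n
instance (lights : List Int) (n : Int) (out : List Int) : Decidable (Spec_light_bulbs lights n out) := by unfold Spec_light_bulbs; infer_instance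

-- ===== CLAIM (what is proved, stated in full; the proofs are below) =====
def Claim_equal_light_bulbs : Prop := ∀ (lights : List Int) (n : Int), Dom_light_bulbs lights n → Spec_light_bulbs lights n (light_bulbs lights n)

-- ===== LEMMAS AND PROOFS =====

-- A-side vocabulary: one simultaneous step of A, read as a gather
def pvPred (L j : Nat) : Nat := if j = 0 then L - 1 else j - 1

def pvGstep (xs : List Int) : List Int :=
  (List.range xs.length).map (fun j =>
    if xs.getD (pvPred xs.length j) 0 = 1 then 1 - xs.getD j 0 else xs.getD j 0)

-- which positions A's scatter loop has toggled after processing i = 0, …, k-1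
abbrev pvTog (xs : List Int) (k j : Nat) : Prop :=
  (1 ≤ j ∧ j ≤ k ∧ xs.getD (j - 1) 0 = 1) ∨
  (j = 0 ∧ k = xs.length ∧ 0 < xs.length ∧ xs.getD (xs.length - 1) 0 = 1)

def pvPartial (xs : List Int) (k : Nat) : List Int :=
  (List.range xs.length).map (fun j =>
    if pvTog xs k j then 1 - xs.getD j 0 else xs.getD j 0)

lemma pvPartial_getD (xs : List Int) (k j : Nat) (hj : j < xs.length) :
    (pvPartial xs k).getD j 0 = if pvTog xs k j then 1 - xs.getD j 0 else xs.getD j 0 := by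
  unfold pvPartial
  exact PySem.List.getD_map_range _ xs.length j 0 hj

lemma pvPartial_zero (xs : List Int) : pvPartial xs 0 = xs := by
  apply List.ext_getElem
  · simp [pvPartial]
  · intro j h1 h2
    have hnot : ¬ pvTog xs 0 j := by rintro (⟨h, h', _⟩ | ⟨_, h0, hl, _⟩) <;> omega
    simp only [pvPartial, List.getElem_map, List.getElem_range, if_neg hnot]
    exact List.getD_eq_getElem _ _ h2

lemma pvSetD_zero (xs : List Int) (v : Int) : PySem.List.pySetD xs 0 v = xs.set 0 v := by
  rw [show (0 : Int) = ((0 : Nat) : Int) from rfl, PySem.List.pySetD_natCast]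

lemma pvStepA_partial (xs : List Int) (k : Nat) (hk : k ≤ xs.length) :
    (PySem.List.pyRange 0 (k : Int) 1).foldl (fun new_lights i =>
      if PySem.List.pyGetD xs i 0 = 1 then
        if i + 1 < PySem.List.len xs then
          PySem.List.pySetD new_lights (i + 1) (1 - PySem.List.pyGetD new_lights (i + 1) 0)
        else
          PySem.List.pySetD new_lights 0 (1 - PySem.List.pyGetD new_lights 0 0)
      else new_lights) xs = pvPartial xs k := by
  induction k with
  | zero =>
    rw [show ((0 : Nat) : Int) = 0 from rfl, PySem.List.pyRange_one_eq_nil (le_refl 0)]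
    simpa using (pvPartial_zero xs).symm
  | succ k ih =>
    have hk' : k ≤ xs.length := by omega
    have hklt : k < xs.length := by omega
    have hcast : ((k + 1 : Nat) : Int) = (k : Int) + 1 := by push_cast; ring
    rw [hcast, PySem.List.pyRange_one_succ_right (by exact_mod_cast Nat.zero_le k),
      List.foldl_append, ih hk']
    simp only [List.foldl_cons, List.foldl_nil]
    rw [PySem.List.pyGetD_natCast, PySem.List.len_eq]
    by_cases hone : xs.getD k 0 = 1
    · rw [if_pos hone]
      by_cases hlt : k + 1 < xs.length
      · rw [if_pos (by exact_mod_cast hlt)]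
        have hcast2 : (k : Int) + 1 = ((k + 1 : Nat) : Int) := by push_cast; ring
        rw [hcast2, PySem.List.pyGetD_natCast, PySem.List.pySetD_natCast,
          pvPartial_getD xs k (k + 1) hlt]
        have hnot : ¬ pvTog xs k (k + 1) := by
          rintro (⟨h, h', _⟩ | ⟨h0, _, _, _⟩) <;> omega
        rw [if_neg hnot]
        apply List.ext_getElem
        · simp [pvPartial]
        · intro j h1 h2
          have hjlen : j < xs.length := by simpa [pvPartial] using h1
          simp only [pvPartial, List.getElem_set, List.getElem_map, List.getElem_range]
          by_cases hjk : k + 1 = j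
          · rw [if_pos hjk]
            have htog : pvTog xs (k + 1) j := by
              left; refine ⟨by omega, by omega, ?_⟩
              rw [show j - 1 = k by omega]; exact hone
            rw [if_pos htog, ← hjk]
          · rw [if_neg hjk]
            have hiff : pvTog xs (k + 1) j ↔ pvTog xs k j := by
              constructor
              · rintro (⟨h, h', hv⟩ | ⟨h0, hlen, hpos, hv⟩)
                · left; exact ⟨h, by omega, hv⟩
                · exact absurd hlen (by omega)
              · rintro (⟨h, h', hv⟩ | ⟨h0, hlen, hpos, hv⟩)
                · left; exact ⟨h, by omega, hv⟩
                · exact absurd hlen (by omega)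
            simp only [hiff]
      · rw [if_neg (by exact_mod_cast hlt)]
        have hk1 : k + 1 = xs.length := by omega
        rw [PySem.List.pyGetD_zero, pvSetD_zero, pvPartial_getD xs k 0 (by omega)]
        have hnot : ¬ pvTog xs k 0 := by
          rintro (⟨h, _, _⟩ | ⟨_, hlen, _, _⟩) <;> omega
        rw [if_neg hnot]
        apply List.ext_getElem
        · simp [pvPartial]
        · intro j h1 h2
          have hjlen : j < xs.length := by simpa [pvPartial] using h1
          simp only [pvPartial, List.getElem_set, List.getElem_map, List.getElem_range]
          by_cases hj0 : 0 = j
          · rw [if_pos hj0]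
            have htog : pvTog xs (k + 1) j := by
              right
              refine ⟨hj0.symm, hk1, by omega, ?_⟩
              rw [show xs.length - 1 = k by omega]; exact hone
            rw [if_pos htog, ← hj0]
          · rw [if_neg hj0]
            have hiff : pvTog xs (k + 1) j ↔ pvTog xs k j := by
              constructor
              · rintro (⟨h, h', hv⟩ | ⟨h0, hlen, hpos, hv⟩)
                · left; exact ⟨h, by omega, hv⟩
                · exact absurd h0 (by omega)
              · rintro (⟨h, h', hv⟩ | ⟨h0, hlen, hpos, hv⟩)
                · left; exact ⟨h, by omega, hv⟩
                · exact absurd h0 (by omega)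
            simp only [hiff]
    · rw [if_neg hone]
      apply List.ext_getElem
      · simp [pvPartial]
      · intro j h1 h2
        have hjlen : j < xs.length := by simpa [pvPartial] using h1
        simp only [pvPartial, List.getElem_map, List.getElem_range]
        have hiff : pvTog xs k j ↔ pvTog xs (k + 1) j := by
          constructor
          · rintro (⟨h, h', hv⟩ | ⟨h0, hlen, hpos, hv⟩)
            · left; exact ⟨h, by omega, hv⟩
            · exact absurd hlen (by omega)
          · rintro (⟨h, h', hv⟩ | ⟨h0, hlen, hpos, hv⟩)
            · left
              refine ⟨h, ?_, hv⟩
              rcases Nat.lt_or_ge j (k + 1) with hlt | hge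
              · omega
              · exfalso
                have : j = k + 1 := by omega
                rw [this] at hv
                rw [show k + 1 - 1 = k by omega] at hv
                exact hone hv
            · exfalso
              rw [show xs.length - 1 = k by omega] at hv
              exact hone hv
        simp only [hiff]

lemma pvStepA_eq (xs : List Int) :
    (PySem.List.pyRange 0 (PySem.List.len xs) 1).foldl (fun new_lights i =>
      if PySem.List.pyGetD xs i 0 = 1 then
        if i + 1 < PySem.List.len xs then
          PySem.List.pySetD new_lights (i + 1) (1 - PySem.List.pyGetD new_lights (i + 1) 0)
        else
          PySem.List.pySetD new_lights 0 (1 - PySem.List.pyGetD new_lights 0 0)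
      else new_lights) xs = pvGstep xs := by
  have hrange : PySem.List.pyRange 0 (PySem.List.len xs) 1
      = PySem.List.pyRange 0 ((xs.length : Nat) : Int) 1 := by
    rw [PySem.List.len_eq]
  rw [hrange, pvStepA_partial xs xs.length (le_refl _)]
  apply List.ext_getElem
  · simp [pvPartial, pvGstep]
  · intro j h1 h2
    have hjlen : j < xs.length := by simpa [pvPartial] using h1
    simp only [pvPartial, pvGstep, List.getElem_map, List.getElem_range]
    have hiff : pvTog xs xs.length j ↔ xs.getD (pvPred xs.length j) 0 = 1 := by
      constructor
      · rintro (⟨h, h', hv⟩ | ⟨h0, _, _, hv⟩)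
        · rwa [show pvPred xs.length j = j - 1 by unfold pvPred; rw [if_neg (by omega)]]
        · rwa [show pvPred xs.length j = xs.length - 1 by unfold pvPred; rw [if_pos h0]]
      · intro hv
        rcases Nat.eq_zero_or_pos j with hj0 | hjpos
        · right
          refine ⟨hj0, rfl, by omega, ?_⟩
          rwa [show pvPred xs.length j = xs.length - 1 by unfold pvPred; rw [if_pos hj0]] at hv
        · left
          refine ⟨by omega, by omega, ?_⟩
          rwa [show pvPred xs.length j = j - 1 by unfold pvPred; rw [if_neg (by omega)]] at hv
    simp only [hiff]

lemma light_bulbs_eq_iterate (lights : List Int) (n : Int) :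
    light_bulbs lights n = pvGstep^[n.toNat] lights := by
  unfold light_bulbs
  rw [PySem.List.foldl_congr_mem _ _ (fun s (_ : Int) => pvGstep s) _ (by
    intro acc x _
    simp only [PySem.List.slice_none_none]
    exact pvStepA_eq acc)]
  rw [List.foldl_const]
  congr 1
  rw [PySem.List.length_pyRange_one]
  omega

-- B-side: the gather comprehension of Source B is exactly pvGstep
lemma pvAltStep_eq (state : List Int) : light_bulbs_altStep state = pvGstep state := by
  unfold light_bulbs_altStep pvGstep
  have hR : PySem.List.pyRange 0 (PySem.List.len state) 1
      = (List.range state.length).map (fun j : Nat => (j : Int)) := by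
    rw [PySem.List.len_eq, PySem.List.pyRange_one,
      show (((state.length : Int)) - 0).toNat = state.length from by omega]
    exact List.map_congr_left (fun a _ => by omega)
  rw [hR, List.map_map]
  apply List.map_congr_left
  intro j hj
  have hjlen : j < state.length := List.mem_range.mp hj
  simp only [Function.comp_def]
  rw [PySem.List.pyGetD_natCast]
  congr 1
  -- the left-neighbour read: Python's state[j - 1] = state[pvPred L j]
  by_cases hj0 : j = 0
  · subst hj0
    have hne : state ≠ [] := by intro h; rw [h] at hjlen; simp at hjlen
    rw [show ((0 : Nat) : Int) - 1 = -1 by ring, PySem.List.pyGetD_neg_one state 0 hne,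
      List.getLast_eq_getElem, ← List.getD_eq_getElem _ 0 (by omega),
      show pvPred state.length 0 = state.length - 1 from by unfold pvPred; rw [if_pos rfl]]
  · rw [show (j : Int) - 1 = ((j - 1 : Nat) : Int) by omega, PySem.List.pyGetD_natCast]
    congr 1
    unfold pvPred
    rw [if_neg hj0]

lemma pvAltRun_eq (k : Nat) : ∀ state, light_bulbs_altRun k state = pvGstep^[k] state := by
  induction k with
  | zero => intro state; rfl
  | succ k ih =>
    intro state
    rw [light_bulbs_altRun, ih, pvAltStep_eq, ← Function.iterate_succ_apply]

-- once an iterate repeats, everything later is periodic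
lemma pvIterPeriodic (f : List Int → List Int) (x : List Int) (t0 p : Nat)
    (hcyc : f^[t0 + p] x = f^[t0] x) :
    ∀ a, t0 ≤ a → ∀ k, f^[a + k * p] x = f^[a] x := by
  have hbase : ∀ a, t0 ≤ a → f^[a + p] x = f^[a] x := by
    intro a ha
    obtain ⟨c, rfl⟩ := Nat.exists_eq_add_of_le ha
    rw [show t0 + c + p = c + (t0 + p) by omega, Function.iterate_add_apply, hcyc,
      ← Function.iterate_add_apply, Nat.add_comm]
  intro a ha k
  induction k with
  | zero => simp
  | succ k ihk =>
    rw [show a + (k + 1) * p = (a + k * p) + p by ring, hbase _ (by omega), ihk]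

-- what the memo dictionary means: seen[s] = t0 iff s was the state at time t0 < t
def pvSeenInv (X : List Int) (t : Nat) (seen : PySem.Dict (List Int) Nat) : Prop :=
  ∀ s t0, seen.get? s = some t0 → pvGstep^[t0] X = s ∧ t0 < t

lemma pvAltLoop_eq (X : List Int) :
    ∀ (fuel m t : Nat) (seen : PySem.Dict (List Int) Nat) (state : List Int),
    fuel + t = m → state = pvGstep^[t] X → pvSeenInv X t seen →
    light_bulbs_altLoop fuel m t seen state = pvGstep^[m] X := by
  intro fuel
  induction fuel with
  | zero =>
    intro m t seen state hft hs _
    have htm : t = m := by omega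
    subst htm
    rw [light_bulbs_altLoop, hs]
  | succ fuel ih =>
    intro m t seen state hft hs hinv
    rw [light_bulbs_altLoop]
    cases hlook : PySem.Dict.get? seen state with
    | some t0 =>
      show light_bulbs_altRun ((m - t) % (t - t0)) state = pvGstep^[m] X
      obtain ⟨hX0, hlt⟩ := hinv state t0 hlook
      have hp : 0 < t - t0 := by omega
      have hcyc : pvGstep^[t0 + (t - t0)] X = pvGstep^[t0] X := by
        rw [show t0 + (t - t0) = t by omega, ← hs, hX0]
      have hper := pvIterPeriodic pvGstep X t0 (t - t0) hcyc
        (t + (m - t) % (t - t0)) (by omega) ((m - t) / (t - t0))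
      have hmEq : m = t + (m - t) % (t - t0) + (m - t) / (t - t0) * (t - t0) := by
        have h1 := Nat.mod_add_div (m - t) (t - t0)
        have h2 := Nat.mul_comm ((m - t) / (t - t0)) (t - t0)
        omega
      rw [pvAltRun_eq, hs, ← Function.iterate_add_apply,
        Nat.add_comm ((m - t) % (t - t0)) t]
      conv_rhs => rw [hmEq]
      exact hper.symm
    | none =>
      exact ih m (t + 1) _ _ (by omega)
        (by rw [pvAltStep_eq, hs]; exact (Function.iterate_succ_apply' _ _ _).symm)
        (by
          intro s t0 h
          rw [PySem.Dict.get?_insert] at h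
          split at h
          · next heq =>
            obtain rfl := heq
            have ht0 : t0 = t := by injection h with h'; omega
            exact ⟨by rw [ht0, ← hs], by omega⟩
          · obtain ⟨h1, h2⟩ := hinv s t0 h
            exact ⟨h1, by omega⟩)

-- ===== VERDICT (by name: the statement is the Claim_ definition above) =====
theorem light_bulbs_spec : Claim_equal_light_bulbs := by
  intro lights n _
  unfold Spec_light_bulbs
  rw [light_bulbs_eq_iterate]
  show pvGstep^[n.toNat] lights
      = light_bulbs_altLoop (max n 0).toNat (max n 0).toNat 0 PySem.Dict.empty lights
  rw [show (max n 0).toNat = n.toNat by omega]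
  exact (pvAltLoop_eq lights n.toNat n.toNat 0 PySem.Dict.empty lights (by omega) rfl
    (fun s t0 h => by rw [PySem.Dict.get?_empty] at h; cases h)).symm
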